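-- pv_equiv track=rewrite | github.com/paiml/depyler | examples/functional_programming_combined.py | drop_while_condition
-- ===== SOURCE A (Python) =====
-- from typing import List, Dict, Tuple, Callable
--
-- def drop_while_condition(data: List[int], threshold: int) -> List[int]:
--     """Drop elements while condition is true"""
--     result: List[int] = []
--     dropping: bool = True
--
--     for item in data:
--         if dropping and item < threshold:
--             continue
--         dropping = False
--         result.append(item)
--
--     return result
-- ===== SOURCE B (Python) =====
-- def drop_while_condition(data, threshold):
--     """Drop elements while condition is true"""
--     for i, item in enumerate(data):
--         if item >= threshold:
--             return data[i:]
--     return []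
-- ===== Notes on version B (the rewrite author's own statement) =====
-- stated objective: simpler
-- what changed: Replaces the flag-driven element-by-element append loop with a search for the first index meeting the threshold followed by a single slice.
import Mathlib
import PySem

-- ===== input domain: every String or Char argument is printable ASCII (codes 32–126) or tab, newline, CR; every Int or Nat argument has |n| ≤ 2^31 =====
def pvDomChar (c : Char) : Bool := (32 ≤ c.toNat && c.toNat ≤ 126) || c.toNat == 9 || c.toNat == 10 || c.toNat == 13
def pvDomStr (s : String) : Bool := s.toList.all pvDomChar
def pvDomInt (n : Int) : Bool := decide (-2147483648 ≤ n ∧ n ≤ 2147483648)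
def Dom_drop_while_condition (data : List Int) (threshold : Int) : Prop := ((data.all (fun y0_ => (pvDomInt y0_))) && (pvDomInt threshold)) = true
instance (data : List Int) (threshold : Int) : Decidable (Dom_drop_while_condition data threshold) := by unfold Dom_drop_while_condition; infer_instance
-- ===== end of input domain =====

-- B replaces A's flag-driven append loop by a search for the first index meeting the
-- threshold followed by one slice (simpler decomposition, same O(n) cost).

-- ===== PORT A =====
-- for-loop with state (result, dropping); append = result ++ [item]
def drop_while_condition (data : List Int) (threshold : Int) : List Int :=
  (data.foldl
    (fun (s : List Int × Bool) item =>
      if s.2 && decide (item < threshold) then s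
      else (s.1 ++ [item], false))
    ([], true)).1

-- ===== PORT B =====
-- scan enumerate(data) for the first item ≥ threshold; return data[i:] via slice
def dwcGo (data : List Int) (threshold : Int) : List (Int × Int) → List Int
  | [] => []
  | (i, x) :: rest =>
      if threshold ≤ x then PySem.List.slice data (some i) none
      else dwcGo data threshold rest

def drop_while_condition_alt (data : List Int) (threshold : Int) : List Int :=
  dwcGo data threshold (PySem.List.enumerate data)

-- ===== PRECONDITION & SPEC =====
def Spec_drop_while_condition (data : List Int) (threshold : Int) (out : List Int) : Prop := out = drop_while_condition_alt data threshold
instance (data : List Int) (threshold : Int) (out : List Int) : Decidable (Spec_drop_while_condition data threshold out) := by unfold Spec_drop_while_condition; infer_instance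

-- ===== CLAIM (what is proved, stated in full; the proofs are below) =====
def Claim_equal_drop_while_condition : Prop := ∀ (data : List Int) (threshold : Int), Dom_drop_while_condition data threshold → Spec_drop_while_condition data threshold (drop_while_condition data threshold)

-- ===== LEMMAS AND PROOFS =====

-- once dropping = false, A's fold just appends everything
theorem dwcA_false (threshold : Int) : ∀ (l : List Int) (acc : List Int),
    l.foldl
      (fun (s : List Int × Bool) item =>
        if s.2 && decide (item < threshold) then s
        else (s.1 ++ [item], false))
      (acc, false) = (acc ++ l, false) := by
  intro l
  induction l with
  | nil => intro acc; simp
  | cons x xs ih =>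
    intro acc
    rw [List.foldl_cons]
    simp only [Bool.false_and]
    rw [if_neg (by simp), ih, List.append_assoc]
    rfl

-- A computes dropWhile (· < threshold)
theorem dwcA_spec (threshold : Int) : ∀ (l : List Int),
    drop_while_condition l threshold = l.dropWhile (fun x => decide (x < threshold)) := by
  intro l
  unfold drop_while_condition
  induction l with
  | nil => simp [List.foldl]
  | cons x xs ih =>
    rw [List.foldl_cons]
    by_cases h : x < threshold
    · rw [if_pos (by simp [h]), List.dropWhile_cons_of_pos (by simpa using h)]
      exact ih
    · rw [if_neg (by simp [h]), dwcA_false, List.dropWhile_cons_of_neg (by simpa using h)]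
      simp

-- B's scan over enumerate (pre ++ suf) starting at index (length pre) computes dropWhile on suf
theorem dwcB_spec (threshold : Int) : ∀ (suf pre : List Int),
    dwcGo (pre ++ suf) threshold (PySem.List.enumerate suf (pre.length : Int)) =
      suf.dropWhile (fun x => decide (x < threshold)) := by
  intro suf
  induction suf with
  | nil => intro pre; simp [PySem.List.enumerate_nil, dwcGo]
  | cons x xs ih =>
    intro pre
    rw [PySem.List.enumerate_cons]
    by_cases h : threshold ≤ x
    · simp only [dwcGo, if_pos h, List.dropWhile]
      rw [PySem.List.slice_from_natCast]
      simp [not_lt.mpr h]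
    · simp only [dwcGo, if_neg h, List.dropWhile]
      have hx : (x < threshold) := lt_of_not_ge h
      have := ih (pre ++ [x])
      simp only [List.append_assoc, List.cons_append, List.nil_append,
        List.length_append, List.length_cons, List.length_nil] at this
      simp only [hx, decide_true]
      rw [show ((pre.length : Int) + 1) = (((pre.length + 1 : Nat)) : Int) by push_cast; ring]
      simpa using this

-- ===== VERDICT (by name: the statement is the Claim_ definition above) =====
theorem drop_while_condition_spec : Claim_equal_drop_while_condition := by
  intro data threshold _
  unfold Spec_drop_while_condition drop_while_condition_alt
  have := dwcB_spec threshold data []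
  simp only [List.nil_append, List.length_nil, Int.natCast_zero] at this
  rw [dwcA_spec, ← this]
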